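-- pv_equiv track=rewrite | github.com/sina-rezghian/jobboard | job-seeker/jobboard/jobs/models.py | _tokenize_csv
-- ===== SOURCE A (Python) =====
-- def _tokenize_csv(text: str | None) -> list[str]:
--     if not text:
--         return []
--     # split by comma / whitespace
--     raw = []
--     for part in text.replace("\n", " ").replace(";", ",").split(","):
--         raw.extend(part.split())
--     tokens = [t.strip().lower() for t in raw if t.strip()]
--     # unique preserving order
--     seen=set()
--     out=[]
--     for t in tokens:
--         if t not in seen:
--             out.append(t); seen.add(t)
--     return out
-- ===== SOURCE B (Python) =====
-- def _tokenize_csv(text):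
--     if not text:
--         return []
--     tokens = []
--     cur = []
--     for ch in text:
--         if ch in ",; \t\n\r\x0b\x0c":
--             if cur:
--                 tokens.append("".join(cur))
--                 cur = []
--         else:
--             cur.append(ch.lower())
--     if cur:
--         tokens.append("".join(cur))
--     return list(dict.fromkeys(tokens))
-- ===== Notes on version B (the rewrite author's own statement) =====
-- stated objective: simpler
-- what changed: Replaces A's four-stage pipeline (two replace() passes, comma split, nested whitespace split, strip/lower comprehension, manual seen-set loop) by a single character scan that classifies each char as separator or token char (lowercasing on the fly) and a final list(dict.fromkeys(...)) dedup.
import Mathlib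
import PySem

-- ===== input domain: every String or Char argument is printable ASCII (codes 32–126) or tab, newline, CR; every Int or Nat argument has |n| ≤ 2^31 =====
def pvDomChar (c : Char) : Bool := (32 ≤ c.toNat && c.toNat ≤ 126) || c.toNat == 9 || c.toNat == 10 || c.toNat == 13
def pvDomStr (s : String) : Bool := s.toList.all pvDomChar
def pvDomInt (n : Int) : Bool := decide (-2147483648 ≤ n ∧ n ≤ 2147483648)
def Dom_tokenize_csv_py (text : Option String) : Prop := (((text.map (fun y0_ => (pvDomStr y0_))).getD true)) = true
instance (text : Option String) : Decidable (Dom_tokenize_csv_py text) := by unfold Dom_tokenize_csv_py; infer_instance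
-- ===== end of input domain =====

-- B replaces A's replace/split/split/strip/lower pipeline and manual seen-loop by one
-- character scan plus a dict.fromkeys-style dedup (objective: simpler; same return value).

-- ===== PORT A =====
def tokenize_csv_py (text : Option String) : List String :=
  match text with
  | none => []
  | some s =>
    if s = "" then []
    else
      -- for part in text.replace("\n"," ").replace(";",",").split(","): raw.extend(part.split())
      -- (sep "," is a nonempty literal, so Str.split? is always `some`)
      let raw : List String :=
        (((PySem.Str.split? (PySem.Str.replace (PySem.Str.replace s "\n" " ") ";" ",") ",").getD []).foldl
          (fun acc part => acc ++ PySem.Str.split₀ part) [])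
      let tokens := (raw.filter (fun t => PySem.Str.strip t != "")).map
        (fun t => PySem.Str.lower (PySem.Str.strip t))
      (tokens.foldl
        (fun (st : PySem.Set String × List String) t =>
          if PySem.Set.contains st.1 t then st else (PySem.Set.add st.1 t, st.2 ++ [t]))
        (PySem.Set.empty, [])).2

-- ===== PORT B =====
-- `ch in ",; \t\n\r\x0b\x0c"`
def bSep (c : Char) : Bool :=
  c == ',' || c == ';' || c == ' ' || c == '\t' || c == '\n' || c == '\r' ||
  c == Char.ofNat 11 || c == Char.ofNat 12

-- loop body: separator flushes cur (if nonempty) into tokens, other chars get lowered onto cur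
def bStep (st : List String × List Char) (c : Char) : List String × List Char :=
  if bSep c then (if st.2.isEmpty then st else (st.1 ++ [String.ofList st.2], []))
  else (st.1, st.2 ++ [PySem.Chars.lowerChar c])

def tokenize_csv_py_alt (text : Option String) : List String :=
  match text with
  | none => []
  | some s =>
    if s = "" then []
    else
      let st := s.toList.foldl bStep ([], [])
      let tokens := if st.2.isEmpty then st.1 else st.1 ++ [String.ofList st.2]
      PySem.List.dedup tokens

-- ===== PRECONDITION & SPEC =====
def Spec_tokenize_csv_py (text : Option String) (out : List String) : Prop := out = tokenize_csv_py_alt text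
instance (text : Option String) (out : List String) : Decidable (Spec_tokenize_csv_py text out) := by unfold Spec_tokenize_csv_py; infer_instance

-- ===== CLAIM (what is proved, stated in full; the proofs are below) =====
def Claim_equal_tokenize_csv_py : Prop := ∀ (text : Option String), Dom_tokenize_csv_py text → Spec_tokenize_csv_py text (tokenize_csv_py text)

-- ===== LEMMAS AND PROOFS =====

-- the composition of A's two single-char replaces, as a char map
def gRep (c : Char) : Char := if c = '\n' then ' ' else if c = ';' then ',' else c

-- "comma or whitespace", A's effective separator predicate after the replaces
def sep1 (c : Char) : Bool := (c == ',') || PySem.Chars.isspace c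

theorem modifyHead_id {α : Type} (l : List (List α)) :
    l.modifyHead (fun x => x) = l := by cases l <;> simp

theorem modifyHead_nilap {α : Type} (l : List (List α)) :
    l.modifyHead (fun x => [] ++ x) = l := by cases l <;> simp

theorem splitOnP_no_sat {α : Type} (p : α → Bool) (l : List α)
    (h : ∀ c ∈ l, p c = false) : List.splitOnP p l = [l] := by
  induction l with
  | nil => simp
  | cons a t ih =>
    simp only [List.splitOnP_cons, h a (by simp)]
    simp [ih (fun c hc => h c (by simp [hc]))]

theorem splitOnP_append_free {α : Type} (p : α → Bool) (pre l : List α)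
    (h : ∀ c ∈ pre, p c = false) :
    List.splitOnP p (pre ++ l) = (List.splitOnP p l).modifyHead (pre ++ ·) := by
  induction pre with
  | nil => simp [modifyHead_id]
  | cons a t ih =>
    simp only [List.cons_append, List.splitOnP_cons, h a (by simp),
      ih (fun c hc => h c (by simp [hc])), Bool.false_eq_true, if_false,
      List.modifyHead_modifyHead]
    congr 1

theorem mem_splitOnP_free {α : Type} (p : α → Bool) (l : List α) :
    ∀ w ∈ List.splitOnP p l, ∀ c ∈ w, p c = false := by
  induction l with
  | nil => intro w hw; simp at hw; simp [hw]
  | cons a t ih =>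
    intro w hw
    by_cases ha : p a = true
    · simp only [List.splitOnP_cons, ha, if_true, List.mem_cons] at hw
      rcases hw with rfl | hw
      · simp
      · exact ih w hw
    · rcases hsp : List.splitOnP p t with _ | ⟨h0, r⟩
      · exact absurd hsp (List.splitOnP_ne_nil p t)
      · simp only [List.splitOnP_cons, ha, Bool.false_eq_true, if_false, hsp,
          List.modifyHead, List.mem_cons] at hw
        rcases hw with rfl | hw
        · intro c hc
          rcases List.mem_cons.1 hc with rfl | hc
          · simpa using ha
          · exact ih h0 (by simp [hsp]) c hc
        · exact ih w (by simp [hsp, hw])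

theorem map_modifyHead_cons (c : Char) (l : List (List Char)) :
    (l.modifyHead (c :: ·)).map (List.map PySem.Chars.lowerChar) =
    (l.map (List.map PySem.Chars.lowerChar)).modifyHead (PySem.Chars.lowerChar c :: ·) := by
  cases l <;> simp

-- characterization of A's whitespace splitter: words = nonempty pieces of splitOnP isspace
theorem split0_go_spec (l : List Char) : ∀ (cur : List Char) (acc : List (List Char)),
    (∀ c ∈ cur, PySem.Chars.isspace c = false) →
    PySem.Chars.split₀.go l cur acc =
      acc.reverse ++ ((List.splitOnP PySem.Chars.isspace l).modifyHead (cur.reverse ++ ·)).filter (· ≠ []) := by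
  induction l with
  | nil =>
    intro cur acc hcur
    simp only [PySem.Chars.split₀.go, List.splitOnP_nil, List.modifyHead, List.append_nil]
    by_cases h : cur = []
    · simp [h]
    · simp [h, List.isEmpty_iff, List.filter]
  | cons c t ih =>
    intro cur acc hcur
    by_cases hc : PySem.Chars.isspace c = true
    · simp only [PySem.Chars.split₀.go, hc, if_true]
      by_cases h : cur = []
      · subst h
        simp only [List.isEmpty_nil, if_true]
        rw [ih [] acc (by simp)]
        simp [List.splitOnP_cons, hc, modifyHead_id, List.filter]
      · rw [if_neg (by simpa [List.isEmpty_iff] using h)]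
        rw [ih [] (cur.reverse :: acc) (by simp)]
        simp [List.splitOnP_cons, hc, modifyHead_id, List.filter, h]
    · simp only [PySem.Chars.split₀.go, hc, Bool.false_eq_true, if_false]
      rw [ih (c :: cur) acc (by
        intro x hx
        rcases List.mem_cons.1 hx with rfl | hx
        · simpa using hc
        · exact hcur x hx)]
      simp only [List.splitOnP_cons, hc, Bool.false_eq_true, if_false, List.modifyHead_modifyHead]
      congr 3
      funext x
      simp

theorem split0_spec (l : List Char) :
    PySem.Chars.split₀ l = (List.splitOnP PySem.Chars.isspace l).filter (· ≠ []) := by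
  rw [PySem.Chars.split₀, split0_go_spec l [] [] (by simp)]
  simp [modifyHead_id]

-- characterization of A's comma splitter
theorem splitOn_go_spec (fuel : Nat) : ∀ (l cur : List Char) (acc : List (List Char)),
    l.length < fuel →
    PySem.Chars.splitOn.go [','] fuel l cur acc =
      acc.reverse ++ (List.splitOnP (· == ',') l).modifyHead (cur.reverse ++ ·) := by
  induction fuel with
  | zero => intro l cur acc h; omega
  | succ n ih =>
    intro l cur acc h
    cases l with
    | nil => simp [PySem.Chars.splitOn.go, modifyHead_id]
    | cons c t =>
      by_cases hc : c = ','
      · subst hc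
        simp only [PySem.Chars.splitOn.go]
        rw [if_pos (by simp [List.isPrefixOf]), ih _ _ _ (by simpa using Nat.lt_of_succ_lt_succ h)]
        simp [List.splitOnP_cons, modifyHead_id]
      · simp only [PySem.Chars.splitOn.go]
        rw [if_neg (by simp [List.isPrefixOf]; exact fun h' => hc h'.symm), ih _ _ _ (by simpa using Nat.lt_of_succ_lt_succ h)]
        simp only [List.splitOnP_cons, beq_iff_eq, hc, if_false, List.modifyHead_modifyHead]
        congr 2
        funext x
        simp

theorem splitOn_comma_spec (l : List Char) :
    PySem.Chars.splitOn l [','] = List.splitOnP (· == ',') l := by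
  rw [PySem.Chars.splitOn, splitOn_go_spec _ _ _ _ (by omega)]
  simp [modifyHead_id]

-- single-char replace is a char map
theorem replace_go_single (a b : Char) (fuel : Nat) : ∀ (l acc : List Char), l.length ≤ fuel →
    PySem.Chars.replace.go [a] [b] fuel l acc =
      acc.reverse ++ l.map (fun c => if c = a then b else c) := by
  induction fuel with
  | zero =>
    intro l acc h
    rw [List.length_eq_zero_iff.1 (Nat.le_zero.1 h)]
    simp [PySem.Chars.replace.go]
  | succ n ih =>
    intro l acc h
    cases l with
    | nil => simp [PySem.Chars.replace.go]
    | cons c t =>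
      by_cases hc : c = a
      · subst hc
        simp only [PySem.Chars.replace.go]
        rw [if_pos (by simp [List.isPrefixOf]), ih _ _ (by simpa using h)]
        simp
      · simp only [PySem.Chars.replace.go]
        rw [if_neg (by simp [List.isPrefixOf]; exact fun h' => hc h'.symm), ih _ _ (by simpa using h)]
        simp [hc]

theorem replace_single (l : List Char) (a b : Char) :
    PySem.Chars.replace l [a] [b] = l.map (fun c => if c = a then b else c) := by
  rw [PySem.Chars.replace]
  simp only [List.isEmpty_cons, Bool.false_eq_true, if_false]
  exact replace_go_single a b l.length l [] (le_refl _)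

-- splitting on commas, then whitespace-splitting each piece and dropping empties,
-- equals splitting on "comma or whitespace" and dropping empties
theorem comma_ws_fuse (t : List Char) : ∀ (pre : List Char), (∀ c ∈ pre, sep1 c = false) →
    ((List.splitOnP (· == ',') t).modifyHead (pre ++ ·)).flatMap
        (fun p => (List.splitOnP PySem.Chars.isspace p).filter (· ≠ [])) =
      ((List.splitOnP sep1 t).modifyHead (pre ++ ·)).filter (· ≠ []) := by
  induction t with
  | nil =>
    intro pre hpre
    have hws : ∀ c ∈ pre, PySem.Chars.isspace c = false := by
      intro c hc; have := hpre c hc; simp [sep1] at this; exact this.2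
    simp [splitOnP_no_sat _ pre hws, List.filter]
  | cons c t ih =>
    intro pre hpre
    have hws : ∀ c ∈ pre, PySem.Chars.isspace c = false := by
      intro x hx; have := hpre x hx; simp [sep1] at this; exact this.2
    rcases hsp : List.splitOnP (· == ',') t with _ | ⟨h0, r⟩
    · exact absurd hsp (List.splitOnP_ne_nil _ t)
    have ihnil := ih [] (by simp)
    rw [hsp] at ihnil
    simp only [modifyHead_nilap] at ihnil
    by_cases hcomma : c = ','
    · subst hcomma
      have hs1 : sep1 ',' = true := by simp [sep1]
      simp only [List.splitOnP_cons, beq_self_eq_true, if_true, hs1, List.modifyHead,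
        List.flatMap_cons, List.filter_cons, List.append_nil]
      rw [splitOnP_no_sat _ pre hws, hsp, ihnil]
      by_cases hp : pre = [] <;> simp [hp, List.filter]
    · by_cases hspace : PySem.Chars.isspace c = true
      · have hs1 : sep1 c = true := by simp [sep1, hspace]
        simp only [List.splitOnP_cons, beq_iff_eq, hcomma, if_false, hsp, hs1, if_true,
          List.modifyHead, List.flatMap_cons]
        rw [splitOnP_append_free _ pre _ hws]
        simp only [List.splitOnP_cons, hspace, if_true, List.modifyHead, List.append_nil]
        simp only [List.flatMap_cons] at ihnil
        simp only [ne_eq, decide_not] at ihnil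
        by_cases hp : pre = [] <;>
          simp [hp, List.filter_cons, List.filter, ihnil, List.append_assoc]
      · have hs1 : sep1 c = false := by simp [sep1, hcomma, hspace]
        simp only [List.splitOnP_cons, beq_iff_eq, hcomma, if_false, hs1, Bool.false_eq_true,
          List.modifyHead_modifyHead]
        have hpre' : ∀ x ∈ pre ++ [c], sep1 x = false := by
          intro x hx
          rcases List.mem_append.1 hx with hx | hx
          · exact hpre x hx
          · simp at hx; subst hx; exact hs1
        have hfun : ((fun x => pre ++ x) ∘ (fun x => c :: x)) = (fun x : List Char => (pre ++ [c]) ++ x) := by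
          funext x; simp
        rw [hfun]
        exact ih (pre ++ [c]) hpre'

-- B's fold characterized the same way
def bFinish (st : List String × List Char) : List String :=
  if st.2.isEmpty then st.1 else st.1 ++ [String.ofList st.2]

theorem bfold_spec (l : List Char) : ∀ (toks : List String) (cur : List Char),
    bFinish (l.foldl bStep (toks, cur)) =
      toks ++ ((((List.splitOnP bSep l).map (List.map PySem.Chars.lowerChar)).modifyHead
        (cur ++ ·)).filter (· ≠ [])).map String.ofList := by
  induction l with
  | nil =>
    intro toks cur
    by_cases h : cur = [] <;> simp [bFinish, h, List.filter]
  | cons c t ih =>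
    intro toks cur
    by_cases hc : bSep c = true
    · simp only [List.foldl_cons, bStep, hc, if_true, List.splitOnP_cons, List.map_cons,
        List.modifyHead]
      by_cases h : cur = []
      · subst h
        simp only [List.isEmpty_nil, if_true]
        rw [ih toks []]
        simp [modifyHead_id, List.filter]
      · rw [if_neg (by simpa [List.isEmpty_iff] using h)]
        rw [ih (toks ++ [String.ofList cur]) []]
        simp [modifyHead_id, List.filter, h]
    · simp only [List.foldl_cons, bStep, hc, Bool.false_eq_true, if_false, List.splitOnP_cons]
      have hfun : (fun x => (cur ++ [PySem.Chars.lowerChar c]) ++ x) =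
          ((fun x => cur ++ x) ∘ fun x : List Char => PySem.Chars.lowerChar c :: x) := by
        funext x; simp
      rw [ih toks (cur ++ [PySem.Chars.lowerChar c]), map_modifyHead_cons,
        List.modifyHead_modifyHead, hfun]

-- A's seen/out loop is ordered dedup
theorem seen_loop_spec (ts : List String) : ∀ (s : PySem.Set String),
    (ts.foldl
      (fun (st : PySem.Set String × List String) t =>
        if PySem.Set.contains st.1 t then st else (PySem.Set.add st.1 t, st.2 ++ [t]))
      (s, s)).2 = ts.foldl PySem.Set.add s := by
  induction ts with
  | nil => intro s; rfl
  | cons t ts ih =>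
    intro s
    by_cases h : PySem.Set.contains s t = true
    · simp only [List.foldl_cons, h, if_true, PySem.Set.add]
      exact ih s
    · simp only [List.foldl_cons, h, Bool.false_eq_true, if_false, PySem.Set.add]
      exact ih (s ++ [t])

theorem char_toNat_inj {c d : Char} (h : c.toNat = d.toNat) : c = d :=
  Char.ext (UInt32.ext_iff.mpr h)

-- per-char translation fact on the domain
theorem char_fact (c : Char) (hd : pvDomChar c = true) :
    sep1 (gRep c) = bSep c ∧ (bSep c = false → gRep c = c) := by
  by_cases h1 : c = '\n'
  · subst h1; exact ⟨by decide, fun h => absurd h (by decide)⟩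
  by_cases h2 : c = ';'
  · subst h2; exact ⟨by decide, fun h => absurd h (by decide)⟩
  by_cases h3 : c = ','
  · subst h3; exact ⟨by decide, fun h => absurd h (by decide)⟩
  by_cases h4 : c = ' '
  · subst h4; exact ⟨by decide, fun h => absurd h (by decide)⟩
  by_cases h5 : c = '\t'
  · subst h5; exact ⟨by decide, fun h => absurd h (by decide)⟩
  by_cases h6 : c = '\r'
  · subst h6; exact ⟨by decide, fun h => absurd h (by decide)⟩
  -- generic printable character: no separator anywhere, unchanged by the replaces
  have hn : ((32 ≤ c.toNat ∧ c.toNat ≤ 126) ∨ c.toNat = 9 ∨ c.toNat = 10) ∨ c.toNat = 13 := by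
    simpa [pvDomChar, Bool.or_eq_true, Bool.and_eq_true, decide_eq_true_iff, or_assoc] using hd
  have e10 : c.toNat ≠ 10 := fun h => h1 (char_toNat_inj h)
  have e59 : c.toNat ≠ 59 := fun h => h2 (char_toNat_inj h)
  have e44 : c.toNat ≠ 44 := fun h => h3 (char_toNat_inj h)
  have e32 : c.toNat ≠ 32 := fun h => h4 (char_toNat_inj h)
  have e9 : c.toNat ≠ 9 := fun h => h5 (char_toNat_inj h)
  have e13 : c.toNat ≠ 13 := fun h => h6 (char_toNat_inj h)
  have e11n : c.toNat ≠ 11 := by omega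
  have e12n : c.toNat ≠ 12 := by omega
  have e11 : c ≠ Char.ofNat 11 := fun h =>
    e11n ((congrArg Char.toNat h).trans (by decide))
  have e12 : c ≠ Char.ofNat 12 := fun h =>
    e12n ((congrArg Char.toNat h).trans (by decide))
  have hws : PySem.Chars.isspace c = false := by
    simp only [PySem.Chars.isspace, Bool.or_eq_false_iff, Bool.and_eq_false_iff,
      decide_eq_false_iff_not]
    omega
  have hg : gRep c = c := by simp [gRep, h1, h2]
  have hb : bSep c = false := by
    simp only [bSep, Bool.or_eq_false_iff, beq_eq_false_iff_ne, ne_eq]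
    exact ⟨⟨⟨⟨⟨⟨⟨h3, h2⟩, h4⟩, h5⟩, h1⟩, h6⟩, e11⟩, e12⟩
  refine ⟨?_, fun _ => hg⟩
  rw [hg, hb]
  simp [sep1, h3, hws]

theorem splitOnP_translate (l : List Char) (hd : ∀ c ∈ l, pvDomChar c = true) :
    List.splitOnP sep1 (l.map gRep) = List.splitOnP bSep l := by
  induction l with
  | nil => simp
  | cons c t ih =>
    obtain ⟨h1, h2⟩ := char_fact c (hd c (by simp))
    have iht := ih (fun x hx => hd x (by simp [hx]))
    by_cases hb : bSep c = true
    · simp [List.splitOnP_cons, h1, hb, iht]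
    · have hgc := h2 (by simpa using hb)
      rw [hgc] at h1
      simp [List.splitOnP_cons, hgc, h1, hb, iht]

theorem strip_free (w : List Char) (h : ∀ c ∈ w, PySem.Chars.isspace c = false) :
    PySem.Chars.strip w = w := by
  have h1 : PySem.Chars.lstrip w = w := by
    simp only [PySem.Chars.lstrip]
    exact List.dropWhile_eq_self_iff.2 (fun hl => by simp [h _ (List.getElem_mem hl)])
  have h2 : PySem.Chars.rstrip w = w := by
    simp only [PySem.Chars.rstrip]
    rw [List.dropWhile_eq_self_iff.2 (fun hl => by
      rw [h _ (List.mem_reverse.1 (List.getElem_mem hl))]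
      simp), List.reverse_reverse]
  simp [PySem.Chars.strip, h1, h2]

theorem ofList_ne_empty {w : List Char} (h : w ≠ []) : String.ofList w ≠ "" := by
  intro he
  apply h
  have := congrArg String.toList he
  simpa using this

-- main equality on a nonempty domain string
set_option maxHeartbeats 2000000 in
theorem tokenize_some (s : String) (hdc : ∀ c ∈ s.toList, pvDomChar c = true) (hne : s ≠ "") :
    tokenize_csv_py (some s) = tokenize_csv_py_alt (some s) := by
  have hnl : ("\n" : String).toList = ['\n'] := by decide
  have hsemi : (";" : String).toList = [';'] := by decide
  have hcom : ("," : String).toList = [','] := by decide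
  have hsp : (" " : String).toList = [' '] := by decide
  -- the two replaces form a char map by gRep
  have hr2 : (PySem.Str.replace (PySem.Str.replace s "\n" " ") ";" ",").toList
      = s.toList.map gRep := by
    rw [PySem.Str.toList_replace, PySem.Str.toList_replace, hnl, hsemi, hcom, hsp,
      replace_single, replace_single, List.map_map]
    refine List.map_congr_left (fun c _ => ?_)
    by_cases h1 : c = '\n'
    · subst h1; simp [gRep]
    · by_cases h2 : c = ';' <;> simp [gRep, Function.comp, h1, h2]
  -- the word list A produces before strip/lower, as char lists
  set X := (List.splitOnP sep1 (s.toList.map gRep)).filter (· ≠ []) with hX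
  have hXfree : ∀ w ∈ X, ∀ c ∈ w, sep1 c = false :=
    fun w hw => mem_splitOnP_free sep1 _ w (List.mem_of_mem_filter hw)
  have hXws : ∀ w ∈ X, ∀ c ∈ w, PySem.Chars.isspace c = false := by
    intro w hw c hc
    have := hXfree w hw c hc
    simp [sep1] at this
    exact this.2
  have hXne : ∀ w ∈ X, w ≠ [] := by
    intro w hw
    simpa using List.of_mem_filter hw
  -- A's raw list is X (as strings)
  have hraw :
      (((PySem.Str.split? (PySem.Str.replace (PySem.Str.replace s "\n" " ") ";" ",") ",").getD []).foldl
        (fun acc part => acc ++ PySem.Str.split₀ part) [])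
      = List.map String.ofList X := by
    rw [PySem.Str.split?, hcom]
    simp only [PySem.Chars.split?, List.isEmpty_cons, Bool.false_eq_true, if_false,
      Option.map_some, Option.getD_some]
    rw [PySem.List.foldl_append_eq_flatMap, hr2, splitOn_comma_spec, List.flatMap_map,
      List.nil_append]
    have h1 : (fun p => PySem.Str.split₀ (String.ofList p))
        = (fun p : List Char => List.map String.ofList (PySem.Chars.split₀ p)) := by
      funext p
      simp [PySem.Str.split₀, String.toList_ofList]
    rw [h1, ← List.map_flatMap]
    refine congrArg (List.map String.ofList) ?_
    have h2 : PySem.Chars.split₀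
        = (fun p => (List.splitOnP PySem.Chars.isspace p).filter (· ≠ [])) := by
      funext p; exact split0_spec p
    rw [h2]
    have := comma_ws_fuse (s.toList.map gRep) [] (by simp)
    simpa only [modifyHead_nilap] using this
  -- A's tokens are the lowered words of X
  have htok :
      ((List.map String.ofList X).filter (fun t => PySem.Str.strip t != "")).map
        (fun t => PySem.Str.lower (PySem.Str.strip t))
      = List.map String.ofList (X.map (List.map PySem.Chars.lowerChar)) := by
    have hstrip : ∀ w ∈ X, PySem.Str.strip (String.ofList w) = String.ofList w := by
      intro w hw
      simp [PySem.Str.strip, String.toList_ofList, strip_free w (hXws w hw)]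
    have hfilter : (List.map String.ofList X).filter (fun t => PySem.Str.strip t != "")
        = List.map String.ofList X := by
      refine List.filter_eq_self.2 ?_
      intro t ht
      obtain ⟨w, hw, rfl⟩ := List.mem_map.1 ht
      rw [hstrip w hw]
      simpa using ofList_ne_empty (hXne w hw)
    rw [hfilter, List.map_map, List.map_map]
    refine List.map_congr_left (fun w hw => ?_)
    simp only [Function.comp]
    rw [hstrip w hw]
    simp [PySem.Str.lower, String.toList_ofList, PySem.Chars.lower]
  -- now compute both sides
  simp only [tokenize_csv_py, tokenize_csv_py_alt, hne, if_false]
  rw [hraw, htok]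
  -- A's seen/out loop is ordered dedup
  have hseen := seen_loop_spec (List.map String.ofList (X.map (List.map PySem.Chars.lowerChar)))
    PySem.Set.empty
  rw [show ((PySem.Set.empty : PySem.Set String), ([] : List String))
      = ((PySem.Set.empty : PySem.Set String), (PySem.Set.empty : PySem.Set String)) from rfl,
    hseen]
  rw [show (List.foldl PySem.Set.add PySem.Set.empty
      (List.map String.ofList (X.map (List.map PySem.Chars.lowerChar))))
    = PySem.List.dedup (List.map String.ofList (X.map (List.map PySem.Chars.lowerChar))) by
      rw [PySem.List.dedup_eq_ofList, PySem.Set.ofList_eq_foldl]; rfl]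
  -- B's fold
  have hb := bfold_spec s.toList [] []
  rw [show (if (List.foldl bStep ([], []) s.toList).2.isEmpty = true then
        (List.foldl bStep ([], []) s.toList).1
      else (List.foldl bStep ([], []) s.toList).1 ++
        [String.ofList (List.foldl bStep ([], []) s.toList).2])
    = bFinish (List.foldl bStep ([], []) s.toList) from rfl, hb]
  simp only [modifyHead_id, List.nil_append]
  -- identify the two token lists
  refine congrArg PySem.List.dedup ?_
  rw [List.filter_map, hX, splitOnP_translate s.toList hdc]
  exact congrArg (List.map String.ofList)
    (congrArg (List.map (List.map PySem.Chars.lowerChar))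
      (List.filter_congr (fun w _ => by simp [Function.comp])).symm)

-- ===== VERDICT (by name: the statement is the Claim_ definition above) =====
theorem tokenize_csv_py_spec : Claim_equal_tokenize_csv_py := by
  intro text hdom
  unfold Spec_tokenize_csv_py
  match text with
  | none => rfl
  | some s =>
    by_cases hne : s = ""
    · simp [tokenize_csv_py, tokenize_csv_py_alt, hne]
    · exact tokenize_some s
        (by simpa [Dom_tokenize_csv_py, pvDomStr, List.all_eq_true] using hdom) hne
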